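-- pv_equiv track=rewrite | github.com/cutehammond772/problem-solving-archive | 백준/Gold/16397. 탈출/탈출.py | button_B
-- ===== SOURCE A (Python) =====
-- def button_B(x):
--   if x == 0:
--     return 0
--
--   x *= 2
--   fragment = []
--
--   while x:
--     fragment.append(x % 10)
--     x //= 10
--
--   fragment[-1] -= 1
--   result = 0
--
--   while fragment:
--     digit = fragment.pop()
--     result = result * 10 + digit
--
--   return result
-- ===== SOURCE B (Python) =====
-- def button_B(x):
--   if x == 0:
--     return 0
--
--   v = 2 * x
--   p = 1
--   while p * 10 <= v:
--     p *= 10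
--
--   return v - p
-- ===== Notes on version B (the rewrite author's own statement) =====
-- stated objective: simpler
-- what changed: Replaces A's digit-decomposition list, the [-1] decrement and the pop-and-rebuild loop by a single loop that finds the place value p of the leading digit of 2x and returns 2x - p.
-- outside the precondition, e.g. on button_B(-1): A does not finish within the time limit, B returns -3
import Mathlib
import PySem

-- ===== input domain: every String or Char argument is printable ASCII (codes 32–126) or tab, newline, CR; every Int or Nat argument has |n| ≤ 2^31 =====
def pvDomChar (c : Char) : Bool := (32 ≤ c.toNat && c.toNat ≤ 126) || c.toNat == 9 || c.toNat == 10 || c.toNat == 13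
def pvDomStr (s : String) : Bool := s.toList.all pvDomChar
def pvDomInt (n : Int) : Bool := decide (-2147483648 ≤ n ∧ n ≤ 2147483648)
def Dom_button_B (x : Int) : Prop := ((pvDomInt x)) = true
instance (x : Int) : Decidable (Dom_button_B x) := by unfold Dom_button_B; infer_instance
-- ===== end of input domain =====

-- B replaces A's digit-list decomposition + leading-digit decrement + rebuild loop by one
-- arithmetic loop computing the place value of the leading digit of 2x (objective: simpler).

-- ===== PORT A =====
-- the `while x: fragment.append(x % 10); x //= 10` loop (the `0 < x` guard only makes it
-- total in Lean; on Pre_ the loop variable is always > 0 while it runs, exactly as `x != 0`)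
def pvFragLoop (x : Int) : List Int :=
  if _h : 0 < x then
    PySem.Int.mod x 10 :: pvFragLoop (PySem.Int.floordiv x 10)
  else []
termination_by x.toNat
decreasing_by
  rw [PySem.Int.floordiv_eq_ediv_of_pos (by omega : (0:Int) < 10)]
  omega

-- the `while fragment: digit = fragment.pop(); result = result * 10 + digit` loop
def pvRebuild (fragment : List Int) (result : Int) : Int :=
  match fragment with
  | [] => result
  | d :: ds => pvRebuild (d :: ds).dropLast (result * 10 + (d :: ds).getLast (by simp))
termination_by fragment.length
decreasing_by simp

def button_B (x : Int) : Int :=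
  if x = 0 then 0
  else
    let x2 := x * 2
    let fragment := pvFragLoop x2
    -- fragment[-1] -= 1
    let fragment := PySem.List.pySetD fragment (-1) (PySem.List.pyGetD fragment (-1) 0 - 1)
    pvRebuild fragment 0

-- ===== PORT B =====
-- `p = 1; while p * 10 <= v: p *= 10`  (the `0 < p` guard only makes it total in Lean;
-- it holds on every iteration reached from p = 1)
def pvPowLoop (v p : Int) : Int :=
  if 0 < p ∧ p * 10 ≤ v then pvPowLoop v (p * 10) else p
termination_by (v - p).toNat
decreasing_by omega

def button_B_alt (x : Int) : Int :=
  if x = 0 then 0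
  else
    let v := 2 * x
    v - pvPowLoop v 1

-- ===== PRECONDITION & SPEC =====
-- Pre_ excludes negative x, on which A's first while-loop never terminates (x //= 10 stalls at -1).
def Pre_button_B (x : Int) : Prop := 0 ≤ x
instance (x : Int) : Decidable (Pre_button_B x) := by unfold Pre_button_B; infer_instance
def pvWitness_button_B : Int := 5

def Spec_button_B (x : Int) (out : Int) : Prop := out = button_B_alt x
instance (x : Int) (out : Int) : Decidable (Spec_button_B x out) := by unfold Spec_button_B; infer_instance

-- ===== CLAIM (what is proved, stated in full; the proofs are below) =====
def Claim_equal_button_B : Prop := ∀ (x : Int), Dom_button_B x → Pre_button_B x → Spec_button_B x (button_B x)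

-- ===== LEMMAS AND PROOFS =====

-- value of a little-endian digit list
def pvNum : List Int → Int
  | [] => 0
  | d :: ds => d + 10 * pvNum ds

theorem pvNum_append (a b : List Int) :
    pvNum (a ++ b) = pvNum a + 10 ^ a.length * pvNum b := by
  induction a with
  | nil => simp [pvNum]
  | cons d ds ih => simp [pvNum, ih, pow_succ]; ring

theorem pvFragLoop_num (x : Int) (hx : 0 ≤ x) : pvNum (pvFragLoop x) = x := by
  induction x using pvFragLoop.induct with
  | case1 x h ih =>
      rw [pvFragLoop]; simp only [h, dif_pos]
      have hd : PySem.Int.floordiv x 10 = x / 10 := PySem.Int.floordiv_eq_ediv_of_pos (by omega)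
      have hm : PySem.Int.mod x 10 = x % 10 := PySem.Int.mod_eq_emod_of_pos (by omega)
      rw [pvNum, ih (by rw [hd]; omega), hd, hm]; omega
  | case2 x h =>
      rw [pvFragLoop]; simp only [h]
      simp [pvNum]; omega

theorem pvFragLoop_ne_nil (x : Int) (hx : 0 < x) : pvFragLoop x ≠ [] := by
  rw [pvFragLoop]; simp [hx]

theorem pvFragLoop_bounds (x : Int) (hx : 0 < x) :
    10 ^ ((pvFragLoop x).length - 1) ≤ x ∧ x < 10 ^ (pvFragLoop x).length := by
  induction x using pvFragLoop.induct with
  | case1 x h ih =>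
      rw [pvFragLoop]; simp only [h, dif_pos]
      have hd : PySem.Int.floordiv x 10 = x / 10 := PySem.Int.floordiv_eq_ediv_of_pos (by omega)
      by_cases hsmall : x < 10
      · have hq : x / 10 = 0 := by omega
        rw [pvFragLoop]
        simp [hq]
        omega
      · have hq : 0 < PySem.Int.floordiv x 10 := by rw [hd]; omega
        obtain ⟨h1, h2⟩ := ih hq
        have hne : pvFragLoop (PySem.Int.floordiv x 10) ≠ [] := pvFragLoop_ne_nil _ hq
        have hlen : 1 ≤ (pvFragLoop (PySem.Int.floordiv x 10)).length :=
          List.length_pos_iff.mpr hne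
        simp only [List.length_cons, Nat.add_sub_cancel]
        generalize hn : (pvFragLoop (PySem.Int.floordiv x 10)).length = n at h1 h2 hlen ⊢
        rw [hd] at h1 h2
        have e1 : (10:Int) ^ n = 10 * 10 ^ (n - 1) := by
          conv_lhs => rw [show n = (n - 1) + 1 by omega]
          rw [pow_succ]; ring
        have e2 : (10:Int) ^ (n + 1) = 10 * 10 ^ n := by rw [pow_succ]; ring
        rw [e1] at h2
        constructor
        · rw [e1]; omega
        · rw [e2, e1]; omega
  | case2 x h => omega

theorem pvRebuild_append (l : List Int) (d r : Int) :
    pvRebuild (l ++ [d]) r = pvRebuild l (r * 10 + d) := by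
  cases l with
  | nil => rw [pvRebuild]; simp [pvRebuild]
  | cons a as =>
      rw [show (a :: as) ++ [d] = a :: (as ++ [d]) from rfl, pvRebuild]
      have hgl : ∀ (h : a :: (as ++ [d]) ≠ []), (a :: (as ++ [d])).getLast h = d := by
        intro h
        apply Option.some_injective
        rw [← List.getLast?_eq_some_getLast h,
            show a :: (as ++ [d]) = (a :: as) ++ [d] from rfl, List.getLast?_concat]
      rw [hgl, show (a :: (as ++ [d])).dropLast = a :: as from
            by rw [show a :: (as ++ [d]) = (a :: as) ++ [d] from rfl, List.dropLast_concat]]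

theorem pvRebuild_num (l : List Int) (r : Int) :
    pvRebuild l r = r * 10 ^ l.length + pvNum l := by
  induction l using List.reverseRecOn generalizing r with
  | nil => simp [pvRebuild, pvNum]
  | append_singleton l d ih =>
      rw [pvRebuild_append, ih, pvNum_append]
      simp [pvNum, pow_succ]; ring

theorem pvSetLast (l : List Int) (h : l ≠ []) (w : Int) :
    PySem.List.pySetD l (-1) w = l.dropLast ++ [w] := by
  have hlen : 1 ≤ l.length := List.length_pos_iff.mpr h
  have h1 : PySem.List.pySetD l (-1) w = l.set (l.length - 1) w := by
    simp [PySem.List.pySetD, PySem.List.pySet?, PySem.List.pyIdx?, hlen]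
  rw [h1]; clear h1 hlen
  induction l with
  | nil => simp at h
  | cons a as ih =>
      cases as with
      | nil => simp
      | cons b bs => simpa using ih (by simp)

theorem pvPowLoop_spec (v : Int) (k j : Nat) (hk : 10 ^ (k - 1) ≤ v) (hk2 : v < 10 ^ k)
    (hj : j + 1 ≤ k) : pvPowLoop v (10 ^ j) = 10 ^ (k - 1) := by
  have main : ∀ m j, k - 1 - j = m → j + 1 ≤ k → pvPowLoop v ((10:Int) ^ j) = 10 ^ (k - 1) := by
    intro m
    induction m with
    | zero =>
        intro j hm hj
        have hjk : j = k - 1 := by omega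
        subst hjk
        rw [pvPowLoop, if_neg]
        push Not
        intro _
        have : (10:Int) ^ (k - 1) * 10 = 10 ^ k := by
          conv_rhs => rw [show k = (k - 1) + 1 by omega]
          rw [pow_succ]
        omega
    | succ m ih =>
        intro j hm hj
        have hcond : 0 < (10:Int) ^ j ∧ (10:Int) ^ j * 10 ≤ v := by
          refine ⟨pow_pos (by omega) j, ?_⟩
          have e : (10:Int) ^ j * 10 = 10 ^ (j + 1) := (pow_succ 10 j).symm
          have hle : (10:Int) ^ (j + 1) ≤ 10 ^ (k - 1) :=
            pow_le_pow_right₀ (by omega) (by omega)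
          omega
        rw [pvPowLoop, if_pos hcond, show (10:Int) ^ j * 10 = 10 ^ (j + 1) from (pow_succ 10 j).symm]
        exact ih (j + 1) (by omega) (by omega)
  exact main (k - 1 - j) j rfl hj

theorem pvA_closed (v : Int) (hv : 0 < v) :
    pvRebuild (PySem.List.pySetD (pvFragLoop v) (-1)
      (PySem.List.pyGetD (pvFragLoop v) (-1) 0 - 1)) 0
    = v - 10 ^ ((pvFragLoop v).length - 1) := by
  have hne : pvFragLoop v ≠ [] := pvFragLoop_ne_nil v hv
  rw [PySem.List.pyGetD_neg_one _ 0 hne, pvSetLast _ hne, pvRebuild_num, pvNum_append]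
  have hnum' : pvNum (pvFragLoop v).dropLast
      + 10 ^ (pvFragLoop v).dropLast.length * pvNum [(pvFragLoop v).getLast hne] = v := by
    rw [← pvNum_append, List.dropLast_concat_getLast hne]
    exact pvFragLoop_num v (le_of_lt hv)
  have hdl : (pvFragLoop v).dropLast.length = (pvFragLoop v).length - 1 :=
    List.length_dropLast
  rw [hdl] at hnum' ⊢
  simp only [pvNum] at hnum' ⊢
  ring_nf
  ring_nf at hnum'
  linarith

theorem pvB_closed (v : Int) (hv : 0 < v) :
    pvPowLoop v 1 = 10 ^ ((pvFragLoop v).length - 1) := by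
  obtain ⟨h1, h2⟩ := pvFragLoop_bounds v hv
  have hlen : 1 ≤ (pvFragLoop v).length :=
    List.length_pos_iff.mpr (pvFragLoop_ne_nil v hv)
  have := pvPowLoop_spec v (pvFragLoop v).length 0 h1 h2 (by omega)
  simpa using this

-- ===== VERDICT (by name: the statement is the Claim_ definition above) =====
theorem button_B_spec : Claim_equal_button_B := by
  intro x _ hpre
  unfold Spec_button_B
  by_cases hx : x = 0
  · simp [button_B, button_B_alt, hx]
  · have hv : 0 < x * 2 := by unfold Pre_button_B at hpre; omega
    simp only [button_B, button_B_alt, if_neg hx]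
    rw [show 2 * x = x * 2 from by ring, pvA_closed _ hv, pvB_closed _ hv]
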